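-- pv_equiv track=rewrite | github.com/2510aaae4/clinic-scheduler | clinic-scheduler/modules/fitness_evaluator.py | _get_person_assignments
-- ===== SOURCE A (Python) =====
-- from typing import Dict, List, Tuple, Any
--
-- def _get_person_assignments(schedule: Dict) -> Dict[str, List[Tuple]]:
--     """Get all assignments for each person"""
--     person_assignments = {}
--
--     for day in schedule:
--         for time_slot in schedule[day]:
--             for room, person_id in schedule[day][time_slot].items():
--                 if person_id:
--                     if person_id not in person_assignments:
--                         person_assignments[person_id] = []
--                     person_assignments[person_id].append((day, time_slot, room))
--
--     return person_assignments
-- ===== SOURCE B (Python) =====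
-- def _get_person_assignments(schedule):
--     """Get all assignments for each person"""
--     flat = [(pid, (day, ts, room))
--             for day, slots in schedule.items()
--             for ts, rooms in slots.items()
--             for room, pid in rooms.items()
--             if pid]
--     return {pid: [t for p, t in flat if p == pid]
--             for pid in dict.fromkeys(p for p, _ in flat)}
-- ===== Notes on version B (the rewrite author's own statement) =====
-- stated objective: simpler
-- what changed: A groups in one pass by incrementally building a dict (membership test, create-empty-list, append) inside three nested loops; B keeps no accumulator at all: it flattens the schedule once, takes the distinct person ids in first-occurrence order with dict.fromkeys, and builds each person's list by an independent filtering scan of the flat list (grouping by repeated filtering, O(k*n), instead of hash-grouped single-pass appends).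
import Mathlib
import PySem

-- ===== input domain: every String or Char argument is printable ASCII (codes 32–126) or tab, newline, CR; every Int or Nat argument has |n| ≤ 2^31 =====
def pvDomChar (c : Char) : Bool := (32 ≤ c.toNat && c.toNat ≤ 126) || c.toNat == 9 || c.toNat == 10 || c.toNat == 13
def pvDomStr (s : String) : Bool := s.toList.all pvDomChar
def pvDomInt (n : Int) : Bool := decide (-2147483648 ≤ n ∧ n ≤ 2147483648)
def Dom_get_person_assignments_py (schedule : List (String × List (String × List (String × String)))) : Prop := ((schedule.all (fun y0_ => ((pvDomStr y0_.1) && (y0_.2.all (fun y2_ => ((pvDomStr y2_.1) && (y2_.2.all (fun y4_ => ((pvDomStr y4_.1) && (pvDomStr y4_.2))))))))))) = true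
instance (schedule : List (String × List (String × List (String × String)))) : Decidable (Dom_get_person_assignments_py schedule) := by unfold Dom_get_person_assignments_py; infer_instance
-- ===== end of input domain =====

-- B replaces A's incremental single-pass dict-grouping by staged passes with no accumulator: flatten the
-- schedule once into (person_id, (day, time_slot, room)) pairs, take the distinct ids in first-occurrence
-- order, and build each person's list by an independent filtering scan of the flat list. Same return value.


-- ===== PORT A =====
-- transliteration of A: three nested dict-iteration loops; 'if person_id:' is the nonemptiness test;
-- 'if person_id not in d: d[person_id] = []' then '.append(...)' (= modify with default, key now present)
def get_person_assignments_py (schedule : List (String × List (String × List (String × String)))) : List (String × List (String × String × String)) :=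
  (schedule.foldl (fun acc ds =>
    ds.2.foldl (fun acc ts =>
      ts.2.foldl (fun acc rp =>
        if rp.2 ≠ "" then
          (if acc.contains rp.2 then acc else acc.insert rp.2 []).modify rp.2 []
            (· ++ [(ds.1, ts.1, rp.1)])
        else acc) acc) acc) (PySem.Dict.empty : PySem.Dict String (List (String × String × String)))).items

-- ===== PORT B =====
-- B's flattening comprehension: [(pid, (day, ts, room)) … if pid]
def pvFlatten (schedule : List (String × List (String × List (String × String)))) : List (String × (String × String × String)) :=
  schedule.flatMap (fun ds =>
    ds.2.flatMap (fun ts =>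
      (ts.2.filter (fun rp => rp.2 != "")).map (fun rp => (rp.2, (ds.1, ts.1, rp.1)))))

-- B: distinct ids in first-occurrence order (dict.fromkeys), each paired with its own filtering scan
def get_person_assignments_py_alt (schedule : List (String × List (String × List (String × String)))) : List (String × List (String × String × String)) :=
  let flat := pvFlatten schedule
  (PySem.List.dedup (flat.map (·.1))).map
    (fun pid => (pid, (flat.filter (fun p => p.1 == pid)).map (·.2)))

-- ===== PRECONDITION & SPEC =====
def Spec_get_person_assignments_py (schedule : List (String × List (String × List (String × String)))) (out : List (String × List (String × String × String))) : Prop := out = get_person_assignments_py_alt schedule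
instance (schedule : List (String × List (String × List (String × String)))) (out : List (String × List (String × String × String))) : Decidable (Spec_get_person_assignments_py schedule out) := by unfold Spec_get_person_assignments_py; infer_instance

-- ===== CLAIM =====
def Claim_equal_get_person_assignments_py : Prop := ∀ (schedule : List (String × List (String × List (String × String)))), Dom_get_person_assignments_py schedule → Spec_get_person_assignments_py schedule (get_person_assignments_py schedule)

-- ===== LEMMAS AND PROOFS =====

-- A's ensure-key-then-append step is exactly 'modify with default []'
theorem pv_step_collapse (d : PySem.Dict String (List (String × String × String))) (k : String)
    (t : String × String × String) :
    (if d.contains k then d else d.insert k []).modify k [] (· ++ [t]) = d.modify k [] (· ++ [t]) := by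
  cases hc : d.contains k with
  | true => simp
  | false =>
    simp only [Bool.false_eq_true, if_false, PySem.Dict.modify, PySem.Dict.getD_insert_self,
      PySem.Dict.getD_of_not_contains d _ hc, PySem.Dict.insert_insert_self]

-- A's nested loops are the single grouping fold over the flattened list
theorem pv_A_flat (schedule : List (String × List (String × List (String × String)))) :
    ∀ d : PySem.Dict String (List (String × String × String)),
    schedule.foldl (fun acc ds =>
      ds.2.foldl (fun acc ts =>
        ts.2.foldl (fun acc rp =>
          if rp.2 ≠ "" then
            (if acc.contains rp.2 then acc else acc.insert rp.2 []).modify rp.2 []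
              (· ++ [(ds.1, ts.1, rp.1)])
          else acc) acc) acc) d
    = (pvFlatten schedule).foldl (fun d p => d.modify p.1 [] (· ++ [p.2])) d := by
  intro d
  unfold pvFlatten
  rw [List.foldl_flatMap]
  refine PySem.List.foldl_congr_mem _ _ _ _ (fun acc ds _ => ?_)
  rw [List.foldl_flatMap]
  refine PySem.List.foldl_congr_mem _ _ _ _ (fun acc2 ts _ => ?_)
  rw [List.foldl_map, List.foldl_filter]
  refine PySem.List.foldl_congr_mem _ _ _ _ (fun acc3 rp _ => ?_)
  by_cases hr : rp.2 = ""
  · simp [hr]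
  · simp only [hr, ne_eq, not_false_eq_true, if_true, bne_iff_ne]
    exact pv_step_collapse acc3 rp.2 (ds.1, ts.1, rp.1)

theorem get_person_assignments_py_spec_aux (schedule : List (String × List (String × List (String × String)))) :
    get_person_assignments_py schedule = get_person_assignments_py_alt schedule := by
  unfold get_person_assignments_py get_person_assignments_py_alt
  rw [pv_A_flat schedule PySem.Dict.empty]
  set flat := pvFlatten schedule with hflat
  have hkA : (flat.foldl (fun d p => d.modify p.1 [] (· ++ [p.2]))
      (PySem.Dict.empty : PySem.Dict String (List (String × String × String)))).keys
      = PySem.Set.ofList (flat.map (·.1)) := by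
    rw [PySem.Dict.keys_foldl_modify_key flat (·.1) [] (fun _ p => (· ++ [p.2])),
      PySem.Dict.keys_empty, PySem.Set.update_nil_left]
  rw [PySem.Dict.items_eq_map_keys _ (by rw [hkA]; exact PySem.Set.nodup_ofList _) [], hkA,
    ← PySem.List.dedup_eq_ofList]
  refine List.map_congr_left (fun k _ => ?_)
  rw [PySem.Dict.getD_foldl_modify_append flat PySem.Dict.empty k, PySem.Dict.getD_empty]
  rfl

-- ===== VERDICT =====
theorem get_person_assignments_py_spec : Claim_equal_get_person_assignments_py := by
  intro schedule _
  exact get_person_assignments_py_spec_aux schedule
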